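-- pv_equiv track=rewrite | github.com/ambroisie/advent-of-code | 2025/d04/ex2/ex2.py | solve
-- ===== SOURCE A (Python) =====
-- import itertools
-- from typing import NamedTuple
--
-- class Point(NamedTuple):
--     x: int
--     y: int
--
-- def solve(input: list[str]) -> int:
--     def parse(input: list[str]) -> set[Point]:
--         return {
--             Point(x, y)
--             for x, line in enumerate(input)
--             for y, c in enumerate(line)
--             if c == "@"
--         }
--
--     def is_accessible(point: Point, rolls: set[Point]) -> bool:
--         assert point in rolls  # Sanity check
--         return (
--             sum(
--                 Point(point.x + dx, point.y + dy) in rolls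
--                 for dx, dy in itertools.product(range(-1, 1 + 1), repeat=2)
--                 if dx != 0 or dy != 0
--             )
--             < 4
--         )
--
--     rolls = parse(input)
--     removed = 0
--     while accessible := {p for p in rolls if is_accessible(p, rolls)}:
--         removed += len(accessible)
--         rolls -= accessible
--     return removed
-- ===== SOURCE B (Python) =====
-- def solve(input: list[str]) -> int:
--     points = [(x, y) for x, row in enumerate(input) for y, c in enumerate(row) if c == "@"]
--     alive = set(points)
--     stack = list(points)
--     removed = 0
--     while stack:
--         p = stack.pop()
--         if p not in alive:
--             continue
--         x, y = p
--         nbrs = [(x + dx, y + dy) for dx in (-1, 0, 1) for dy in (-1, 0, 1) if dx != 0 or dy != 0]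
--         if sum(q in alive for q in nbrs) < 4:
--             alive.discard(p)
--             removed += 1
--             stack.extend(q for q in nbrs if q in alive)
--     return removed
-- ===== Notes on version B (the rewrite author's own statement) =====
-- stated objective: alternative
-- what changed: A repeatedly rescans the whole remaining set each erosion round, recomputing every point's 8-neighbour count per round until a round removes nothing; B does a single worklist peel with a stack: a point is re-examined only when one of its neighbours is removed, so each removal is processed once.
import Mathlib
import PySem

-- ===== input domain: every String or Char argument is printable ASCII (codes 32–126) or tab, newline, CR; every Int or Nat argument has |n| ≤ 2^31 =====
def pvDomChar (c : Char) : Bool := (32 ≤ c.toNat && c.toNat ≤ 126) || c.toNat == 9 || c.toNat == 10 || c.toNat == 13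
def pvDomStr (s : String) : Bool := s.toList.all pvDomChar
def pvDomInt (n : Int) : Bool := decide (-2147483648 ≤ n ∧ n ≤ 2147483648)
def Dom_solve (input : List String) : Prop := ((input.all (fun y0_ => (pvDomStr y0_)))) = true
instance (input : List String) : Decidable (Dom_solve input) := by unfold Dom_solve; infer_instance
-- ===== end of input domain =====

-- B replaces A's repeated full-set erosion rounds (each round rescans every remaining point)
-- by a worklist/stack peeling that re-examines a point only when one of its neighbours was
-- removed (objective: alternative algorithm; same measured cost on random inputs).

-- ===== PORT A =====
-- parse: the identical set/list comprehension appears in both Pythons; shared helper.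
def pvParse (input : List String) : List (Int × Int) :=
  (PySem.List.enumerate input).flatMap (fun xl =>
    (PySem.List.enumerate xl.2.toList).filterMap (fun yc =>
      if yc.2 = '@' then some (xl.1, yc.1) else none))

-- itertools.product(range(-1, 1 + 1), repeat=2) with the 'dx != 0 or dy != 0' filter
def pvOffsetsA : List (Int × Int) :=
  ((PySem.List.pyRange (-1) (1 + 1) 1).flatMap (fun dx =>
    (PySem.List.pyRange (-1) (1 + 1) 1).map (fun dy => (dx, dy)))).filter
    (fun d => decide (d.1 ≠ 0 ∨ d.2 ≠ 0))

def pvIsAccessible (point : Int × Int) (rolls : PySem.Set (Int × Int)) : Bool :=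
  decide (((pvOffsetsA.map (fun d =>
    if (point.1 + d.1, point.2 + d.2) ∈ rolls then (1 : Int) else 0)).sum) < 4)

-- the while loop; fuel: each iteration removes at least one point, so rolls.length + 1 suffices
def pvLoopA : Nat → PySem.Set (Int × Int) → Int → Int
  | 0, _, removed => removed
  | fuel + 1, rolls, removed =>
    let accessible := rolls.filter (fun p => pvIsAccessible p rolls)
    if accessible.isEmpty then removed
    else pvLoopA fuel (PySem.Set.diff rolls accessible) (removed + accessible.length)

def solve (input : List String) : Int :=
  let rolls := PySem.Set.ofList (pvParse input)
  pvLoopA (rolls.length + 1) rolls 0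

-- ===== PORT B =====
-- [(x+dx, y+dy) for dx in (-1,0,1) for dy in (-1,0,1) if dx != 0 or dy != 0]
def pvNbrs (p : Int × Int) : List (Int × Int) :=
  (([(-1 : Int), 0, 1].flatMap (fun dx => [(-1 : Int), 0, 1].map (fun dy => (dx, dy)))).filter
    (fun d => decide (d.1 ≠ 0 ∨ d.2 ≠ 0))).map (fun d => (p.1 + d.1, p.2 + d.2))

-- Python's list used as a stack (append/extend at the end, pop() from the end) is kept
-- REVERSED here: top of the stack = head of the list, extend = reversed-prefix cons.
-- fuel: the measure 9*alive.length + stack.length decreases each step (see pvLoopB_spec).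
def pvLoopB : Nat → PySem.Set (Int × Int) → List (Int × Int) → Int → Int
  | 0, _, _, removed => removed
  | fuel + 1, alive, stack, removed =>
    match stack with
    | [] => removed
    | p :: rest =>
      if p ∈ alive then
        let nbrs := pvNbrs p
        if ((nbrs.map (fun q => if q ∈ alive then (1 : Int) else 0)).sum) < 4 then
          let alive' := PySem.Set.discard alive p
          pvLoopB fuel alive' ((nbrs.filter (fun q => q ∈ alive')).reverse ++ rest) (removed + 1)
        else pvLoopB fuel alive rest removed
      else pvLoopB fuel alive rest removed

def solve_alt (input : List String) : Int :=
  let points := pvParse input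
  let alive := PySem.Set.ofList points
  pvLoopB (9 * alive.length + points.length + 1) alive points.reverse 0

-- ===== PRECONDITION & SPEC =====
def Spec_solve (input : List String) (out : Int) : Prop := out = solve_alt input
instance (input : List String) (out : Int) : Decidable (Spec_solve input out) := by unfold Spec_solve; infer_instance

-- ===== CLAIM (what is proved, stated in full; the proofs are below) =====
def Claim_equal_solve : Prop := ∀ (input : List String), Dom_solve input → Spec_solve input (solve input)

-- ===== LEMMAS AND PROOFS =====

-- degree of p within S = number of its 8 neighbours that lie in S
def pvDeg (S : List (Int × Int)) (p : Int × Int) : Nat :=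
  (pvNbrs p).countP (fun q => decide (q ∈ S))

def pvGood (S : List (Int × Int)) : Prop := ∀ p ∈ S, 4 ≤ pvDeg S p

theorem pvOffsetsA_eq :
    pvOffsetsA = [(-1,-1),(-1,0),(-1,1),(0,-1),(0,1),(1,-1),(1,0),(1,1)] := by decide

theorem pvNbrs_eq (p : Int × Int) :
    pvNbrs p = pvOffsetsA.map (fun d => (p.1 + d.1, p.2 + d.2)) := by
  rw [pvOffsetsA_eq]; rfl

theorem length_pvNbrs (p : Int × Int) : (pvNbrs p).length = 8 := by
  rw [pvNbrs_eq, pvOffsetsA_eq]; rfl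

theorem pvNbrs_symm {p q : Int × Int} (h : q ∈ pvNbrs p) : p ∈ pvNbrs q := by
  rw [pvNbrs_eq, pvOffsetsA_eq] at h ⊢
  simp only [List.mem_map, List.mem_cons, List.not_mem_nil, or_false] at h ⊢
  obtain ⟨d, hd, rfl⟩ := h
  refine ⟨(-d.1, -d.2), ?_, ?_⟩
  · rcases hd with h|h|h|h|h|h|h|h <;> subst h <;> simp
  · ext <;> simp

theorem pvDeg_mono {S T : List (Int × Int)} (h : ∀ x ∈ S, x ∈ T) (p : Int × Int) :
    pvDeg S p ≤ pvDeg T p := by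
  apply List.countP_mono_left
  intro a _ ha
  simp only [decide_eq_true_eq] at ha ⊢
  exact h a ha

theorem pvDeg_eq_countP (S : List (Int × Int)) (p : Int × Int) :
    pvDeg S p = pvOffsetsA.countP (fun d => decide ((p.1 + d.1, p.2 + d.2) ∈ S)) := by
  rw [pvDeg, pvNbrs_eq, List.countP_map]; rfl

theorem pvIsAccessible_iff (p : Int × Int) (S : PySem.Set (Int × Int)) :
    pvIsAccessible p S = true ↔ pvDeg S p < 4 := by
  rw [pvIsAccessible, decide_eq_true_eq, pvDeg_eq_countP]
  have h := PySem.List.sum_map_ite_one_zero (fun d => (p.1 + d.1, p.2 + d.2) ∈ S) pvOffsetsA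
  simp only [decide_eq_true_eq] at h
  rw [h]
  omega

theorem sumB_iff (p : Int × Int) (S : PySem.Set (Int × Int)) :
    (((pvNbrs p).map (fun q => if q ∈ S then (1 : Int) else 0)).sum) < 4 ↔ pvDeg S p < 4 := by
  have h := PySem.List.sum_map_ite_one_zero (fun q => q ∈ S) (pvNbrs p)
  simp only [decide_eq_true_eq] at h
  rw [h, pvDeg]
  omega

theorem pvLoopA_spec : ∀ (fuel : Nat) (S : PySem.Set (Int × Int)) (removed : Int),
    S.Nodup → S.length ≤ fuel →
    ∃ F : List (Int × Int), F.Nodup ∧ (∀ x ∈ F, x ∈ S) ∧ pvGood F ∧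
      (∀ T : List (Int × Int), (∀ x ∈ T, x ∈ S) → pvGood T → ∀ x ∈ T, x ∈ F) ∧
      pvLoopA fuel S removed = removed + ((S.length : Int) - (F.length : Int)) := by
  intro fuel
  induction fuel with
  | zero =>
    intro S removed hnd hlen
    have hS : S = [] := List.eq_nil_of_length_eq_zero (Nat.le_zero.1 hlen)
    subst hS
    refine ⟨[], List.nodup_nil, by simp, by simp [pvGood], ?_, by simp [pvLoopA]⟩
    intro T hT _ x hx
    exact hT x hx
  | succ fuel ih =>
    intro S removed hnd hlen
    have hstep : pvLoopA (fuel + 1) S removed =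
        (if (S.filter (fun p => pvIsAccessible p S)).isEmpty then removed
         else pvLoopA fuel (PySem.Set.diff S (S.filter (fun p => pvIsAccessible p S)))
           (removed + (S.filter (fun p => pvIsAccessible p S)).length)) := rfl
    set acc := S.filter (fun p => pvIsAccessible p S) with hacc
    by_cases hemp : acc.isEmpty
    · rw [hstep, if_pos hemp]
      refine ⟨S, hnd, fun x hx => hx, ?_, fun T hT _ x hx => hT x hx, by ring⟩
      intro q hq
      have hq' : q ∉ acc := by
        rw [List.isEmpty_iff] at hemp
        simp [hemp]
      by_contra hlt
      exact hq' (List.mem_filter.2 ⟨hq, (pvIsAccessible_iff q S).2 (by omega)⟩)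
    · set S' := PySem.Set.diff S acc with hS'
      have hmem' : ∀ x, x ∈ S' ↔ x ∈ S ∧ ¬ (pvIsAccessible x S = true) := by
        intro x
        rw [hS', PySem.Set.mem_diff]
        constructor
        · rintro ⟨hx, hnx⟩
          exact ⟨hx, fun hb => hnx (List.mem_filter.2 ⟨hx, hb⟩)⟩
        · rintro ⟨hx, hnx⟩
          exact ⟨hx, fun hb => hnx (List.mem_filter.1 hb).2⟩
      have hndacc : acc.Nodup := hnd.filter _
      have hndS' : S'.Nodup := PySem.Set.nodup_diff _ _ hnd
      have hdisj : List.Disjoint acc S' := by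
        intro x hxa hxs
        exact ((hmem' x).1 hxs).2 (List.mem_filter.1 hxa).2
      have hperm : (acc ++ S').Perm S := by
        rw [List.perm_ext_iff_of_nodup (hndacc.append hndS' hdisj) hnd]
        intro x
        rw [List.mem_append, hmem' x]
        constructor
        · rintro (hx | ⟨hx, _⟩)
          · exact (List.mem_filter.1 hx).1
          · exact hx
        · intro hx
          by_cases hb : pvIsAccessible x S = true
          · exact Or.inl (List.mem_filter.2 ⟨hx, hb⟩)
          · exact Or.inr ⟨hx, hb⟩
      have hlen2 : acc.length + S'.length = S.length := by
        simpa using hperm.length_eq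
      have haccpos : 0 < acc.length := by
        rcases Nat.eq_zero_or_pos acc.length with h0 | h0
        · exact absurd (by simpa [List.isEmpty_iff] using List.eq_nil_of_length_eq_zero h0) hemp
        · exact h0
      obtain ⟨F, hFnd, hFsub, hFgood, hFmax, hFeq⟩ :=
        ih S' (removed + acc.length) hndS' (by omega)
      refine ⟨F, hFnd, fun x hx => ((hmem' x).1 (hFsub x hx)).1, hFgood, ?_, ?_⟩
      · intro T hT hTg
        have hTS' : ∀ x ∈ T, x ∈ S' := by
          intro x hx
          rw [hmem' x]
          refine ⟨hT x hx, fun hb => ?_⟩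
          have h4 : 4 ≤ pvDeg T x := hTg x hx
          have hm : pvDeg T x ≤ pvDeg S x := pvDeg_mono hT x
          have := (pvIsAccessible_iff x S).1 hb
          omega
        exact hFmax T hTS' hTg
      · rw [hstep, if_neg hemp, hFeq]
        have : (acc.length : Int) + S'.length = S.length := by exact_mod_cast hlen2
        linarith

theorem pvLoopB_spec : ∀ (fuel : Nat) (A stack : List (Int × Int)) (removed : Int),
    A.Nodup → (∀ q ∈ A, pvDeg A q < 4 → q ∈ stack) →
    9 * A.length + stack.length ≤ fuel →
    ∃ F : List (Int × Int), F.Nodup ∧ (∀ x ∈ F, x ∈ A) ∧ pvGood F ∧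
      (∀ T : List (Int × Int), (∀ x ∈ T, x ∈ A) → pvGood T → ∀ x ∈ T, x ∈ F) ∧
      pvLoopB fuel A stack removed = removed + ((A.length : Int) - (F.length : Int)) := by
  intro fuel
  induction fuel with
  | zero =>
    intro A stack removed hnd hinv hlen
    have hA : A = [] := List.eq_nil_of_length_eq_zero (by omega)
    subst hA
    refine ⟨[], List.nodup_nil, by simp, by simp [pvGood], ?_, by simp [pvLoopB]⟩
    intro T hT _ x hx
    exact hT x hx
  | succ fuel ih =>
    intro A stack removed hnd hinv hlen
    match stack with
    | [] =>
      have hstep : pvLoopB (fuel + 1) A [] removed = removed := rfl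
      refine ⟨A, hnd, fun x hx => hx, ?_, fun T hT _ x hx => hT x hx, by rw [hstep]; ring⟩
      intro q hq
      by_contra hlt
      exact absurd (hinv q hq (by omega)) (List.not_mem_nil)
    | p :: rest =>
      by_cases hpA : p ∈ A
      · by_cases hdeg : pvDeg A p < 4
        · -- removal step
          set A' := PySem.Set.discard A p with hA'
          set pushed := ((pvNbrs p).filter (fun q => q ∈ A')).reverse with hpushed
          have hstep : pvLoopB (fuel + 1) A (p :: rest) removed =
              pvLoopB fuel A' (pushed ++ rest) (removed + 1) := by
            rw [pvLoopB]
            rw [if_pos hpA, if_pos ((sumB_iff p A).2 hdeg)]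
          have hmem' : ∀ x, x ∈ A' ↔ x ∈ A ∧ x ≠ p := fun x => PySem.Set.mem_discard A p x
          have hndA' : A'.Nodup := PySem.Set.nodup_discard A p hnd
          have hpnot : p ∉ A' := fun h => ((hmem' p).1 h).2 rfl
          have hperm : (p :: A').Perm A := by
            rw [List.perm_ext_iff_of_nodup (List.nodup_cons.2 ⟨hpnot, hndA'⟩) hnd]
            intro x
            rw [List.mem_cons, hmem' x]
            constructor
            · rintro (rfl | ⟨hx, _⟩)
              · exact hpA
              · exact hx
            · intro hx
              by_cases hxp : x = p
              · exact Or.inl hxp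
              · exact Or.inr ⟨hx, hxp⟩
          have hlenA' : A'.length + 1 = A.length := by
            simpa [Nat.add_comm] using hperm.length_eq
          have hinv' : ∀ q ∈ A', pvDeg A' q < 4 → q ∈ pushed ++ rest := by
            intro q hq hq4
            have hqA : q ∈ A := ((hmem' q).1 hq).1
            have hqp : q ≠ p := ((hmem' q).1 hq).2
            by_cases hold : pvDeg A q < 4
            · have := hinv q hqA hold
              rw [List.mem_cons] at this
              rcases this with h | h
              · exact absurd h hqp
              · exact List.mem_append.2 (Or.inr h)
            · -- the degree of q dropped: p must be a neighbour of q
              have hpn : p ∈ pvNbrs q := by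
                by_contra hpn
                have hle : pvDeg A q ≤ pvDeg A' q := by
                  apply List.countP_mono_left
                  intro x hx hxA
                  simp only [decide_eq_true_eq] at hxA ⊢
                  rw [hmem' x]
                  refine ⟨hxA, fun hxp => ?_⟩
                  subst hxp
                  exact hpn hx
                omega
              have hqn : q ∈ pvNbrs p := pvNbrs_symm hpn
              refine List.mem_append.2 (Or.inl ?_)
              rw [hpushed, List.mem_reverse, List.mem_filter]
              exact ⟨hqn, by simpa using hq⟩
          have hlen' : 9 * A'.length + (pushed ++ rest).length ≤ fuel := by
            have h8 : pushed.length ≤ 8 := by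
              rw [hpushed, List.length_reverse]
              calc ((pvNbrs p).filter (fun q => q ∈ A')).length ≤ (pvNbrs p).length :=
                    List.length_filter_le _ _
                _ = 8 := length_pvNbrs p
            rw [List.length_append]
            simp only [List.length_cons] at hlen
            omega
          obtain ⟨F, hFnd, hFsub, hFgood, hFmax, hFeq⟩ :=
            ih A' (pushed ++ rest) (removed + 1) hndA' hinv' hlen'
          refine ⟨F, hFnd, fun x hx => ((hmem' x).1 (hFsub x hx)).1, hFgood, ?_, ?_⟩
          · intro T hT hTg
            have hpT : p ∉ T := by
              intro hpT
              have h4 : 4 ≤ pvDeg T p := hTg p hpT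
              have hm : pvDeg T p ≤ pvDeg A p := pvDeg_mono hT p
              omega
            have hTA' : ∀ x ∈ T, x ∈ A' := by
              intro x hx
              rw [hmem' x]
              exact ⟨hT x hx, fun hxp => hpT (hxp ▸ hx)⟩
            exact hFmax T hTA' hTg
          · rw [hstep, hFeq]
            have : (A'.length : Int) + 1 = A.length := by exact_mod_cast hlenA'
            linarith
        · -- p alive but not removable: skip
          have hstep : pvLoopB (fuel + 1) A (p :: rest) removed =
              pvLoopB fuel A rest removed := by
            rw [pvLoopB]
            rw [if_pos hpA, if_neg (fun h => hdeg ((sumB_iff p A).1 h))]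
          have hinv' : ∀ q ∈ A, pvDeg A q < 4 → q ∈ rest := by
            intro q hq hq4
            have := hinv q hq hq4
            rw [List.mem_cons] at this
            rcases this with rfl | h
            · omega
            · exact h
          obtain ⟨F, h1, h2, h3, h4, h5⟩ :=
            ih A rest removed hnd hinv' (by simp only [List.length_cons] at hlen; omega)
          exact ⟨F, h1, h2, h3, h4, by rw [hstep, h5]⟩
      · -- p already dead: skip
        have hstep : pvLoopB (fuel + 1) A (p :: rest) removed =
            pvLoopB fuel A rest removed := by
          rw [pvLoopB]
          rw [if_neg hpA]
        have hinv' : ∀ q ∈ A, pvDeg A q < 4 → q ∈ rest := by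
          intro q hq hq4
          have := hinv q hq hq4
          rw [List.mem_cons] at this
          rcases this with rfl | h
          · exact absurd hq hpA
          · exact h
        obtain ⟨F, h1, h2, h3, h4, h5⟩ :=
          ih A rest removed hnd hinv' (by simp only [List.length_cons] at hlen; omega)
        exact ⟨F, h1, h2, h3, h4, by rw [hstep, h5]⟩

theorem solve_spec' (input : List String) : solve input = solve_alt input := by
  unfold solve solve_alt
  set P := PySem.Set.ofList (pvParse input) with hP
  have hnd : P.Nodup := PySem.Set.nodup_ofList _
  obtain ⟨FA, hFAnd, hFAsub, hFAgood, hFAmax, hA⟩ :=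
    pvLoopA_spec (P.length + 1) P 0 hnd (by omega)
  have hstack : ∀ q ∈ P, pvDeg P q < 4 → q ∈ (pvParse input).reverse := by
    intro q hq _
    rw [List.mem_reverse]
    exact (PySem.Set.mem_ofList _ _).1 hq
  obtain ⟨FB, hFBnd, hFBsub, hFBgood, hFBmax, hB⟩ :=
    pvLoopB_spec (9 * P.length + (pvParse input).length + 1) P (pvParse input).reverse 0 hnd hstack
      (by rw [List.length_reverse]; omega)
  have h1 : FA.length ≤ FB.length :=
    ((List.subperm_of_subset hFAnd (fun x hx => hFBmax FA hFAsub hFAgood x hx))).length_le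
  have h2 : FB.length ≤ FA.length :=
    ((List.subperm_of_subset hFBnd (fun x hx => hFAmax FB hFBsub hFBgood x hx))).length_le
  rw [hA, hB]
  have : FA.length = FB.length := le_antisymm h1 h2
  omega

-- ===== VERDICT (by name: the statement is the Claim_ definition above) =====
theorem solve_spec : Claim_equal_solve := by
  intro input _
  exact solve_spec' input
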